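-- pv_equiv track=rewrite | github.com/dlask913/Algorithm | 프로그래머스/1/17681. ［1차］ 비밀지도/［1차］ 비밀지도.py | solution
-- ===== SOURCE A (Python) =====
-- def solution(n, arr1, arr2):
--     answer = ['' for _ in range(n)]
--     binary = [0 for _ in range(n)]
--
--     for x in range(n): # 둘 중에 하나만 벽이어도 벽 -> OR
--         binary[x] = arr1[x] | arr2[x]
--
--     for i in range(n):
--         for j in range(n-1,-1,-1):
--             # 해당 값이 벽인지 아닌지 확인하기 -> AND
--             answer[i] += '#' if binary[i] & (1<<j) else ' '
--
--     return answer
-- ===== SOURCE B (Python) =====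
-- def solution(n, arr1, arr2):
--     # per row: OR the two numbers, mask to n bits, format in binary, pad, translate chars
--     return [
--         ''.join('#' if c == '1' else ' '
--                 for c in format((arr1[i] | arr2[i]) & ((1 << n) - 1), 'b').zfill(n))
--         for i in range(n)
--     ]
-- ===== Notes on version B (the rewrite author's own statement) =====
-- stated objective: idiomatic
-- what changed: Each row is produced by masking the OR to n bits and binary-formatting it with format(.,'b').zfill(n) plus a char translation, instead of A's inner loop testing each bit with 1<<j and appending.
import Mathlib
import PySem

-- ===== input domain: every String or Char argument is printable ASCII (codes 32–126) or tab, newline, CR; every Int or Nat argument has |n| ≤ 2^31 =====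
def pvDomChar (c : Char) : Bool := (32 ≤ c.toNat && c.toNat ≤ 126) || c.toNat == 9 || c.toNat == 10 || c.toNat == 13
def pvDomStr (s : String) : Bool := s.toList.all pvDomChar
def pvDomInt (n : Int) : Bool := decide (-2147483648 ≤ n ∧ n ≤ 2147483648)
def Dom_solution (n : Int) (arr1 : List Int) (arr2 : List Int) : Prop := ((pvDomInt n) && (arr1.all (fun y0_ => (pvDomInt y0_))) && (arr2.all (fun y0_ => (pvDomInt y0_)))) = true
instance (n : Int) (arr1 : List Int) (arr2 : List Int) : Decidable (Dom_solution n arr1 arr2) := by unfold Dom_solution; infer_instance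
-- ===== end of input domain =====

-- B renders each row by formatting (arr1[i]|arr2[i]) & ((1<<n)-1) in binary with zfill
-- instead of A's explicit per-bit mask-testing loop; same cost, different row construction.

-- ===== PORT A =====
def solution (n : Int) (arr1 : List Int) (arr2 : List Int) : List String :=
  -- binary[x] = arr1[x] | arr2[x] for x in range(n)
  let binary : List Int :=
    (PySem.List.pyRange 0 n 1).map
      (fun x => PySem.Int.bor (PySem.List.pyGetD arr1 x 0) (PySem.List.pyGetD arr2 x 0))
  -- for i in range(n): for j in range(n-1,-1,-1): answer[i] += '#' if binary[i] & (1<<j) else ' '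
  (PySem.List.pyRange 0 n 1).map (fun i =>
    (PySem.List.pyRange (n - 1) (-1) (-1)).foldl
      (fun acc j =>
        acc ++ (if PySem.Int.band (PySem.List.pyGetD binary i 0) ((1 : Int) <<< (j.toNat : Int)) ≠ 0
                then "#" else " "))
      "")

-- ===== PORT B =====
def solution_alt (n : Int) (arr1 : List Int) (arr2 : List Int) : List String :=
  (PySem.List.pyRange 0 n 1).map (fun i =>
    String.ofList
      (((PySem.Str.zfill
          (PySem.Int.toBin
            (PySem.Int.band
              (PySem.Int.bor (PySem.List.pyGetD arr1 i 0) (PySem.List.pyGetD arr2 i 0))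
              ((1 : Int) <<< (n.toNat : Int) - 1)))
          n).toList).map (fun c => if c = '1' then '#' else ' ')))

-- ===== PRECONDITION & SPEC =====
-- Pre_ excludes inputs where Python A raises IndexError: n larger than either list's length.
def Pre_solution (n : Int) (arr1 : List Int) (arr2 : List Int) : Prop :=
  n ≤ (arr1.length : Int) ∧ n ≤ (arr2.length : Int)
instance (n : Int) (arr1 : List Int) (arr2 : List Int) : Decidable (Pre_solution n arr1 arr2) := by
  unfold Pre_solution; infer_instance
def pvWitness_solution : Int × List Int × List Int := (2, [2, 1], [1, 1])

def Spec_solution (n : Int) (arr1 : List Int) (arr2 : List Int) (out : List String) : Prop :=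
  out = solution_alt n arr1 arr2
instance (n : Int) (arr1 : List Int) (arr2 : List Int) (out : List String) :
    Decidable (Spec_solution n arr1 arr2 out) := by unfold Spec_solution; infer_instance

-- ===== CLAIM (what is proved, stated in full; the proofs are below) =====
def Claim_equal_solution : Prop := ∀ (n : Int) (arr1 : List Int) (arr2 : List Int),
  Dom_solution n arr1 arr2 → Pre_solution n arr1 arr2 →
  Spec_solution n arr1 arr2 (solution n arr1 arr2)

-- ===== LEMMAS AND PROOFS =====

-- canonical binary-digit list (most significant first) of a natural number
def binChars (n : Nat) : List Char :=
  if _h : n < 2 then [Nat.digitChar n]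
  else binChars (n / 2) ++ [Nat.digitChar (n % 2)]
  decreasing_by exact Nat.div_lt_self (by omega) (by omega)

lemma toDigitsCore_eq_binChars : ∀ (fuel n : Nat) (ds : List Char), n < fuel →
    Nat.toDigitsCore 2 fuel n ds = binChars n ++ ds := by
  intro fuel
  induction fuel with
  | zero => intro n ds h; omega
  | succ fuel ih =>
    intro n ds h
    rw [Nat.toDigitsCore]
    by_cases h2 : n / 2 = 0
    · simp only [h2, if_pos rfl, reduceIte]
      rw [binChars]
      have hn2 : n < 2 := by omega
      simp [hn2, Nat.mod_eq_of_lt hn2]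
    · rw [if_neg h2, ih (n / 2) _ (by omega)]
      conv_rhs => rw [binChars]
      have : ¬ n < 2 := by omega
      simp [this]

lemma toDigits_two_eq_binChars (n : Nat) : Nat.toDigits 2 n = binChars n := by
  have := toDigitsCore_eq_binChars (n + 1) n [] (by omega)
  simpa [Nat.toDigits] using this

lemma binChars_ne_nil (n : Nat) : binChars n ≠ [] := by
  rw [binChars]; split <;> simp

lemma binChars_mem (n : Nat) : ∀ c ∈ binChars n, c = '0' ∨ c = '1' := by
  induction n using Nat.strong_induction_on with
  | _ n ih =>
    rw [binChars]
    split
    · rename_i h; interval_cases n <;> simp [Nat.digitChar]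
    · rename_i h
      intro c hc
      rcases List.mem_append.1 hc with h1 | h1
      · exact ih (n / 2) (Nat.div_lt_self (by omega) (by omega)) c h1
      · have : n % 2 < 2 := Nat.mod_lt _ (by omega)
        interval_cases hm : n % 2 <;> simp_all [Nat.digitChar]

lemma binChars_head_not_sign (n : Nat) (c : Char) (rest : List Char)
    (h : binChars n = c :: rest) : ¬ (c = '+' ∨ c = '-') := by
  have := binChars_mem n c (by rw [h]; exact List.mem_cons_self ..)
  rcases this with h' | h' <;> simp [h']

-- zfill on an all-digit string is plain left padding
lemma zfill_binChars (n : Nat) (w : Int) :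
    PySem.Chars.zfill (binChars n) w =
      List.replicate (w.toNat - (binChars n).length) '0' ++ binChars n := by
  rw [PySem.Chars.zfill.eq_def]
  rcases hb : binChars n with _ | ⟨c, rest⟩
  · exact absurd hb (binChars_ne_nil n)
  · rw [← hb]
    split
    · rename_i hle
      have : w.toNat - (binChars n).length = 0 := by omega
      simp [this]
    · rw [hb]
      simp [if_neg (binChars_head_not_sign n c rest hb)]

-- the right-peel recursion of the padded binary rendering
lemma zfill_snoc (m : Nat) (hm : 0 < m) (W : Nat) :
    PySem.Chars.zfill (binChars W) ((m : Int) + 1) =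
      PySem.Chars.zfill (binChars (W / 2)) (m : Int) ++ [Nat.digitChar (W % 2)] := by
  rw [zfill_binChars, zfill_binChars]
  by_cases h2 : W < 2
  · have hW2 : W / 2 = 0 := by omega
    have hWW : W % 2 = W := by omega
    rw [hW2, hWW]
    have hb0 : binChars 0 = ['0'] := by rw [binChars]; simp [Nat.digitChar]
    have hbW : binChars W = [Nat.digitChar W] := by rw [binChars]; simp [h2]
    rw [hb0, hbW]
    simp only [List.length_singleton]
    have h1 : ((m : Int) + 1).toNat - 1 = m := by omega
    have h2' : (m : Int).toNat - 1 = m - 1 := by omega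
    rw [h1, h2']
    have : List.replicate m '0' = List.replicate (m - 1) '0' ++ ['0'] := by
      have : m = (m - 1) + 1 := by omega
      rw [this]; simp [List.replicate_succ']
    rw [this, List.append_assoc]
  · conv_lhs => rw [binChars]
    rw [dif_neg (by omega)]
    have hlen : (binChars (W / 2) ++ [Nat.digitChar (W % 2)]).length
        = (binChars (W / 2)).length + 1 := by simp
    rw [hlen]
    have harith : ((m : Int) + 1).toNat - ((binChars (W / 2)).length + 1)
        = (m : Int).toNat - (binChars (W / 2)).length := by omega
    rw [harith, List.append_assoc]

-- padded binary rendering as a positional bit map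
lemma zfill_bits (m : Nat) (hm : 0 < m) (W : Nat) (hW : W < 2 ^ m) :
    PySem.Chars.zfill (binChars W) (m : Int) =
      (List.range m).map (fun k => if W.testBit (m - 1 - k) then '1' else '0') := by
  induction m generalizing W with
  | zero => omega
  | succ m ih =>
    by_cases hm0 : m = 0
    · subst hm0
      have : W < 2 := by simpa using hW
      have hbW : binChars W = [Nat.digitChar W] := by rw [binChars]; simp [this]
      rw [hbW, PySem.Chars.zfill]
      interval_cases W <;> simp [Nat.digitChar, Nat.testBit]
    · have hm' : 0 < m := by omega
      have : ((m : Nat) + 1 : Int) = (m : Int) + 1 := by push_cast; ring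
      rw [show ((m + 1 : Nat) : Int) = (m : Int) + 1 by push_cast; ring]
      rw [zfill_snoc m hm' W]
      rw [ih hm' (W / 2) (by
        have : 2 ^ (m + 1) = 2 ^ m * 2 := by ring
        omega)]
      rw [List.range_succ, List.map_append]
      congr 1
      · apply List.map_congr_left
        intro k hk
        have hk' : k < m := List.mem_range.1 hk
        have : m + 1 - 1 - k = (m - 1 - k) + 1 := by omega
        rw [this, Nat.testBit_succ]
      · simp [Nat.testBit_zero]
        rcases Nat.mod_two_eq_zero_or_one W with h | h <;> simp [h, Nat.digitChar]

-- (2^m - 1 - x) is the bitwise complement of x below bit m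
lemma testBit_compl (m : Nat) : ∀ (x j : Nat), x < 2 ^ m → j < m →
    (2 ^ m - 1 - x).testBit j = ! x.testBit j := by
  induction m with
  | zero => omega
  | succ m ih =>
    intro x j hx hj
    have hpow : 2 ^ (m + 1) = 2 * 2 ^ m := by ring
    rw [hpow] at hx ⊢
    cases j with
    | zero =>
      rw [Nat.testBit_zero, Nat.testBit_zero]
      have key : ∀ E x' : Nat, x' < 2 * E → ((2 * E - 1 - x') % 2 = 1 ↔ x' % 2 = 0) := by
        intro E x' h; omega
      have h2 := key (2 ^ m) x hx
      rcases Nat.mod_two_eq_zero_or_one x with h | h <;> simp [h] at h2 ⊢ <;> omega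
    | succ j =>
      rw [Nat.testBit_succ, Nat.testBit_succ]
      have key : ∀ E x' : Nat, (2 * E - 1 - x') / 2 = E - 1 - x' / 2 := by
        intro E x'; omega
      have hdiv := key (2 ^ m) x
      rw [hdiv]
      exact ih (x / 2) j (by omega) (by omega)

lemma int_one_shiftLeft (j : Nat) : ((1 : Int) <<< (j : Int)) = ((2 ^ j : Nat) : Int) := by
  exact Int.one_shiftLeft j

lemma int_mask_cast (m : Nat) : ((1 : Int) <<< (m : Int) - 1) = ((2 ^ m - 1 : Nat) : Int) := by
  rw [int_one_shiftLeft]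
  have h1 : (1 : Nat) ≤ 2 ^ m := Nat.one_le_two_pow
  omega

-- (-k - 1) mod 2^m = 2^m - 1 - (k mod 2^m): the two's-complement identity
lemma emod_neg_mask (k m : Nat) :
    (-(k : Int) - 1) % ((2 ^ m : Nat) : Int) = ((2 ^ m - 1 - k % 2 ^ m : Nat) : Int) := by
  have hE1 : (1 : Nat) ≤ 2 ^ m := Nat.one_le_two_pow
  have h1 : 2 ^ m * (k / 2 ^ m) + k % 2 ^ m = k := Nat.div_add_mod k (2 ^ m)
  have h2 : k % 2 ^ m < 2 ^ m := Nat.mod_lt _ (by positivity)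
  have h1' : ((2 ^ m : Nat) : Int) * ((k / 2 ^ m : Nat) : Int) + ((k % 2 ^ m : Nat) : Int)
      = (k : Int) := by exact_mod_cast congrArg (Nat.cast : Nat → Int) h1
  have hsplit : (-(k : Int) - 1)
      = ((2 ^ m - 1 - k % 2 ^ m : Nat) : Int)
        + ((2 ^ m : Nat) : Int) * (-(((k / 2 ^ m : Nat) : Int)) - 1) := by
    have hc : ((2 ^ m - 1 - k % 2 ^ m : Nat) : Int)
        = ((2 ^ m : Nat) : Int) - 1 - ((k % 2 ^ m : Nat) : Int) := by
      have : k % 2 ^ m ≤ 2 ^ m - 1 := by omega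
      push_cast [this, hE1]
      omega
    rw [hc]
    linear_combination h1'
  rw [hsplit, Int.add_mul_emod_self_left]
  apply Int.emod_eq_of_lt
  · exact Int.natCast_nonneg _
  · exact_mod_cast (by omega : 2 ^ m - 1 - k % 2 ^ m < 2 ^ m)

-- Python's v & (2^m - 1) is v mod 2^m (floor mod)
lemma band_mask_eq_emod (v : Int) (m : Nat) :
    PySem.Int.band v ((1 : Int) <<< (m : Int) - 1) = v % (((2 ^ m : Nat) : Int)) := by
  have hE1 : (1 : Nat) ≤ 2 ^ m := Nat.one_le_two_pow
  rw [PySem.Int.band, int_mask_cast]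
  by_cases hv : 0 ≤ v
  · rw [if_pos hv, if_pos (Int.natCast_nonneg _)]
    obtain ⟨a, rfl⟩ := Int.eq_ofNat_of_zero_le hv
    rw [Int.toNat_natCast, Int.toNat_natCast, Nat.and_two_pow_sub_one_eq_mod,
        Int.natCast_mod]
  · rw [if_neg hv, if_pos (Int.natCast_nonneg _)]
    rw [Int.toNat_natCast]
    set k : Nat := (-v - 1).toNat with hk
    have hvk : v = -(k : Int) - 1 := by rw [hk]; omega
    rw [Nat.and_comm, Nat.and_two_pow_sub_one_eq_mod, hvk, emod_neg_mask]

-- Python's bit test v & (1<<j) reads bit j of the masked value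
lemma band_bit_eq_testBit (v : Int) (m j : Nat) (hj : j < m) :
    (PySem.Int.band v ((1 : Int) <<< (j : Int)) ≠ 0)
      ↔ (PySem.Int.band v ((1 : Int) <<< (m : Int) - 1)).toNat.testBit j = true := by
  have hE1 : (1 : Nat) ≤ 2 ^ j := Nat.one_le_two_pow
  rw [band_mask_eq_emod, PySem.Int.band, int_one_shiftLeft]
  by_cases hv : 0 ≤ v
  · rw [if_pos hv, if_pos (Int.natCast_nonneg _)]
    obtain ⟨a, rfl⟩ := Int.eq_ofNat_of_zero_le hv
    have hWnat : (((a : Nat) : Int) % ((2 ^ m : Nat) : Int)).toNat = a % 2 ^ m := by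
      rw [← Int.natCast_mod]
      exact Int.toNat_natCast _
    rw [hWnat, Nat.testBit_mod_two_pow, Int.toNat_natCast, Int.toNat_natCast,
        Nat.and_two_pow]
    rcases hb : a.testBit j with _ | _
    · simp [hb, hj]
    · have : (0 : Int) < ((2 ^ j : Nat) : Int) := by exact_mod_cast (by positivity : 0 < 2 ^ j)
      simp [hb, hj]
      all_goals omega
  · rw [if_neg hv, if_pos (Int.natCast_nonneg _)]
    set k : Nat := (-v - 1).toNat with hk
    have hvk : v = -(k : Int) - 1 := by rw [hk]; omega
    have hWnat : (v % ((2 ^ m : Nat) : Int)).toNat = 2 ^ m - 1 - k % 2 ^ m := by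
      rw [hvk, emod_neg_mask]
      exact Int.toNat_natCast _
    rw [hWnat, testBit_compl m (k % 2 ^ m) j (Nat.mod_lt _ (by positivity)) hj,
        Nat.testBit_mod_two_pow, Int.toNat_natCast, Nat.and_comm, Nat.and_two_pow]
    rcases hb : k.testBit j with _ | _
    · simp [hb, hj]
    · simp [hb, hj]

-- range-shape lemmas for the two pyRange calls
lemma pyRange_up (m : Nat) :
    PySem.List.pyRange 0 (m : Int) 1 = (List.range m).map (fun (k : Nat) => (k : Int)) := by
  rcases Nat.eq_zero_or_pos m with h | h
  · subst h; simp [PySem.List.pyRange]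
  · simp only [PySem.List.pyRange]
    norm_num [h]

lemma pyRange_down (m : Nat) (hm : 0 < m) :
    PySem.List.pyRange ((m : Int) - 1) (-1) (-1)
      = (List.range m).map (fun (k : Nat) => (m : Int) - 1 - (k : Int)) := by
  have h1 : (-1 : Int) < (m : Int) - 1 := by
    have : (1 : Int) ≤ (m : Int) := by exact_mod_cast hm
    omega
  simp only [PySem.List.pyRange]
  norm_num [h1]
  intro a _
  ring

-- string-building fold = ofList of the per-bit character map
lemma foldl_hash (p : Int → Prop) [DecidablePred p] :
    ∀ (l : List Int) (s : String),
      l.foldl (fun acc j => acc ++ (if p j then "#" else " ")) s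
        = s ++ String.ofList (l.map (fun j => if p j then '#' else ' ')) := by
  intro l
  induction l with
  | nil =>
    intro s
    have h0 : String.ofList ([] : List Char) = "" := by decide
    simp [h0]
  | cons x l ih =>
    intro s
    rw [List.foldl_cons, ih, List.map_cons]
    have hx : (if p x then "#" else " ") = String.ofList [if p x then '#' else ' '] := by
      split_ifs <;> decide
    rw [hx, String.append_assoc, ← String.ofList_append, List.singleton_append]

-- one row: A's bit-test fold equals B's formatted rendering
lemma row_eq (m : Nat) (hm : 0 < m) (v : Int) :
    (PySem.List.pyRange ((m : Int) - 1) (-1) (-1)).foldl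
      (fun acc j =>
        acc ++ (if PySem.Int.band v ((1 : Int) <<< (j.toNat : Int)) ≠ 0 then "#" else " "))
      ""
    = String.ofList
        (((PySem.Str.zfill (PySem.Int.toBin (PySem.Int.band v ((1 : Int) <<< (m : Int) - 1)))
            (m : Int)).toList).map (fun c => if c = '1' then '#' else ' ')) := by
  have hW0 : 0 ≤ PySem.Int.band v ((1 : Int) <<< (m : Int) - 1) := by
    rw [band_mask_eq_emod]
    exact Int.emod_nonneg v (by exact_mod_cast (by positivity : (0:Nat) < 2 ^ m).ne')
  have hWlt : PySem.Int.band v ((1 : Int) <<< (m : Int) - 1) < ((2 ^ m : Nat) : Int) := by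
    rw [band_mask_eq_emod]
    exact Int.emod_lt_of_pos v (by exact_mod_cast (by positivity : (0:Nat) < 2 ^ m))
  set W : Nat := (PySem.Int.band v ((1 : Int) <<< (m : Int) - 1)).toNat with hWdef
  have hWnat : W < 2 ^ m := by omega
  rw [pyRange_down m hm,
      foldl_hash (fun j => PySem.Int.band v ((1 : Int) <<< (j.toNat : Int)) ≠ 0)]
  have hempty : ∀ t : String, "" ++ t = t := by
    intro t; exact String.empty_append
  rw [hempty, PySem.Str.toList_zfill, PySem.Int.toList_toBin]
  have hbin : PySem.Int.toBinChars (PySem.Int.band v ((1 : Int) <<< (m : Int) - 1)) = binChars W := by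
    rw [PySem.Int.toBinChars, if_neg (by omega), toDigits_two_eq_binChars]
  rw [hbin, zfill_bits m hm W hWnat]
  apply congrArg String.ofList
  rw [List.map_map, List.map_map]
  apply List.map_congr_left
  intro k hk
  have hkm : k < m := List.mem_range.1 hk
  have htn : ((m : Int) - 1 - (k : Int)).toNat = m - 1 - k := by omega
  have hiff := band_bit_eq_testBit v m (m - 1 - k) (by omega)
  simp only [Function.comp_apply, htn]
  by_cases hb : W.testBit (m - 1 - k) = true
  · rw [if_pos (hiff.2 hb), hb]
    simp
  · have hb' : W.testBit (m - 1 - k) = false := by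
      rcases hx : W.testBit (m - 1 - k) with _ | _
      · rfl
      · exact absurd hx hb
    rw [if_neg (fun hcon => hb (hiff.1 hcon)), hb']
    simp

-- ===== VERDICT (by name: the statement is the Claim_ definition above) =====
theorem solution_spec : Claim_equal_solution := by
  intro n arr1 arr2 _hdom _hpre
  unfold Spec_solution solution solution_alt
  by_cases hn : 0 < n
  · lift n to Nat using le_of_lt hn with m
    have hm : 0 < m := by exact_mod_cast hn
    rw [pyRange_up m]
    simp only [List.map_map]
    apply List.map_congr_left
    intro k hk
    have hkm : k < m := List.mem_range.1 hk
    have hbinary : PySem.List.pyGetD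
        ((List.range m).map
          ((fun x => PySem.Int.bor (PySem.List.pyGetD arr1 x 0) (PySem.List.pyGetD arr2 x 0))
            ∘ (fun (k : Nat) => (k : Int))))
        ((k : Nat) : Int) 0
        = PySem.Int.bor (PySem.List.pyGetD arr1 ((k : Nat) : Int) 0)
            (PySem.List.pyGetD arr2 ((k : Nat) : Int) 0) := by
      simp [PySem.List.pyGetD, PySem.List.pyGet?_natCast, List.getElem?_map,
        List.getElem?_range, hkm]
    simp only [Function.comp_apply, hbinary, Int.toNat_natCast]
    exact row_eq m hm _
  · have hempty : PySem.List.pyRange 0 n 1 = [] := by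
      rw [PySem.List.pyRange, if_neg (by omega : (1:Int) ≠ 0)]
      simp [show ¬ ((0:Int) < n) from hn]
    simp [hempty]
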